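-- pv_equiv track=rewrite | github.com/Gnoyh/programmers | ps_87390.py | solution
-- ===== SOURCE A (Python) =====
-- def solution(n, left, right):
--     result = []
--
--     left_q = left // n
--     left_r = left % n
--     right_q = right // n
--     right_r = right % n
--
--     if left_q == right_q:
--         return [left_q + 1 if i <= left_q else i + 1 for i in range(left_r, right_r + 1)]
--
--     result += [left_q + 1 if i <= left_q else i + 1 for i in range(left_r, n)]
--
--     for i in range(left_q + 1, right_q):
--         result += [i + 1 if j <= i else j + 1 for j in range(n)]
--
--     result += [right_q + 1 if i <= right_q else i + 1 for i in range(right_r + 1)]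
--
--     return result
-- ===== SOURCE B (Python) =====
-- def solution(n, left, right):
--     def value(i):
--         return max(i // n, i % n) + 1
--
--     top, bottom = left // n, right // n
--     if top == bottom:
--         return [value(i) for i in range(left, right + 1)]
--     return ([value(i) for i in range(left, (top + 1) * n)]
--             + [value(i) for i in range((top + 1) * n, bottom * n)]
--             + [value(i) for i in range(bottom * n, right + 1)])
-- ===== Notes on version B (the rewrite author's own statement) =====
-- stated objective: simpler
-- what changed: B replaces A's row-by-row construction (remainder bookkeeping lr/rr, per-row inner comprehension with the branch q+1 if j<=q else j+1, middle loop appending row lists) by the closed form max(i//n,i%n)+1 mapped over three flat global index segments (head to the end of the first row, the full middle span, the tail of the last row); Pre_ excludes non-positive n: n = 0 raises ZeroDivisionError in A and a negative matrix side is outside the function's natural domain, so neither value there is meaningful.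
-- outside the precondition, e.g. on solution(-1, -6, 3): A returns [1], B returns [8, 7, 6, 5, 4, 3, 2, 1, 1, 1, 1]
import Mathlib
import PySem

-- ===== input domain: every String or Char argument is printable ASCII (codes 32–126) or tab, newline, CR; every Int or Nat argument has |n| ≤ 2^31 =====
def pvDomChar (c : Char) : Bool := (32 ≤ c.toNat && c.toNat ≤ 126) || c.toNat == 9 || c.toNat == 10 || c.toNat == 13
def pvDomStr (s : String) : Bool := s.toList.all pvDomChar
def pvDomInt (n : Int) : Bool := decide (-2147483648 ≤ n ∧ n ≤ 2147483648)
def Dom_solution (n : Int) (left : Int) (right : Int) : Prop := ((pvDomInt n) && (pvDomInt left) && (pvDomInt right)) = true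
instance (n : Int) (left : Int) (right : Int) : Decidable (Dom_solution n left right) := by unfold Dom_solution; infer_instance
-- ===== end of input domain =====

-- B (objective: simpler): the closed form max(i//n, i%n)+1 mapped over three flat global
-- index segments replaces A's row-by-row construction with remainder bookkeeping.

-- ===== PORT A =====
-- literal port of A: block-wise construction with quotient/remainder bookkeeping
def solution (n : Int) (left : Int) (right : Int) : List Int :=
  let left_q := PySem.Int.floordiv left n
  let left_r := PySem.Int.mod left n
  let right_q := PySem.Int.floordiv right n
  let right_r := PySem.Int.mod right n
  if left_q == right_q then
    (PySem.List.pyRange left_r (right_r + 1) 1).map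
      (fun i => if i ≤ left_q then left_q + 1 else i + 1)
  else
    let result : List Int :=
      (PySem.List.pyRange left_r n 1).map
        (fun i => if i ≤ left_q then left_q + 1 else i + 1)
    let result :=
      (PySem.List.pyRange (left_q + 1) right_q 1).foldl
        (fun acc i =>
          acc ++ (PySem.List.pyRange 0 n 1).map
            (fun j => if j ≤ i then i + 1 else j + 1)) result
    result ++
      (PySem.List.pyRange 0 (right_r + 1) 1).map
        (fun i => if i ≤ right_q then right_q + 1 else i + 1)

-- ===== PORT B =====
-- port of B (Source B): closed form max(i//n, i%n)+1 over flat index segments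
def solution_alt (n : Int) (left : Int) (right : Int) : List Int :=
  let value := fun i => max (PySem.Int.floordiv i n) (PySem.Int.mod i n) + 1
  let top := PySem.Int.floordiv left n
  let bottom := PySem.Int.floordiv right n
  if top == bottom then
    (PySem.List.pyRange left (right + 1) 1).map value
  else
    (PySem.List.pyRange left ((top + 1) * n) 1).map value ++
    (PySem.List.pyRange ((top + 1) * n) (bottom * n) 1).map value ++
    (PySem.List.pyRange (bottom * n) (right + 1) 1).map value

-- ===== PRECONDITION & SPEC =====
-- Pre_ excludes non-positive n: n = 0 raises ZeroDivisionError in A, and a negative matrix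
-- side length is outside the function's natural domain (neither A's nor B's value there is
-- meaningful or specified).
def Pre_solution (n : Int) (left : Int) (right : Int) : Prop := 1 <= n
instance (n : Int) (left : Int) (right : Int) : Decidable (Pre_solution n left right) := by unfold Pre_solution; infer_instance
def pvWitness_solution : Int × Int × Int := (3, 2, 7)
def Spec_solution (n : Int) (left : Int) (right : Int) (out : List Int) : Prop := out = solution_alt n left right
instance (n : Int) (left : Int) (right : Int) (out : List Int) : Decidable (Spec_solution n left right out) := by unfold Spec_solution; infer_instance

-- ===== CLAIM (what is proved, stated in full; the proofs are below) =====
def Claim_equal_solution : Prop := ∀ (n : Int) (left : Int) (right : Int), Dom_solution n left right → Pre_solution n left right → Spec_solution n left right (solution n left right)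

-- ===== LEMMAS AND PROOFS =====

-- shift a unit-step range by a constant
lemma pv_shift (c a b : Int) :
    PySem.List.pyRange (c + a) (c + b) 1 = (PySem.List.pyRange a b 1).map (fun x => c + x) := by
  rw [PySem.List.pyRange_one, PySem.List.pyRange_one, List.map_map]
  have h : c + b - (c + a) = b - a := by ring
  rw [h]
  exact List.map_congr_left (fun k _ => by simp [Function.comp]; ring)

-- divmod of q*n + j for 0 <= j < n
lemma pv_fdiv (n q j : Int) (hn : 0 < n) (h0 : 0 ≤ j) (hj : j < n) :
    PySem.Int.floordiv (q * n + j) n = q := by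
  rw [PySem.Int.floordiv_eq_iff_of_pos hn]
  constructor
  · linarith
  · have : (q + 1) * n = q * n + n := by ring
    rw [this]; linarith

lemma pv_fmod (n q j : Int) (hn : 0 < n) (h0 : 0 ≤ j) (hj : j < n) :
    PySem.Int.mod (q * n + j) n = j := by
  have h := PySem.Int.floordiv_mul_add_mod (q * n + j) n
  rw [pv_fdiv n q j hn h0 hj] at h
  linarith

-- one flat segment inside row q equals A's row comprehension over local indices
lemma pv_row (n q a b : Int) (hn : 0 < n) (ha : 0 ≤ a) (hb : b ≤ n) :
    (PySem.List.pyRange (q * n + a) (q * n + b) 1).map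
        (fun i => max (PySem.Int.floordiv i n) (PySem.Int.mod i n) + 1) =
      (PySem.List.pyRange a b 1).map (fun j => if j ≤ q then q + 1 else j + 1) := by
  rw [pv_shift, List.map_map]
  refine List.map_congr_left ?_
  intro x hx
  rw [PySem.List.mem_pyRange_one] at hx
  simp only [Function.comp_apply]
  rw [pv_fdiv n q x hn (by omega) (by omega), pv_fmod n q x hn (by omega) (by omega)]
  split_ifs <;> omega

-- the middle full rows: the flat segment a*n..b*n equals A's row-by-row flatMap
lemma pv_blocks (n : Int) (hn : 0 < n) :
    ∀ (k : Nat) (a b : Int), (b - a).toNat = k →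
      (PySem.List.pyRange (a * n) (b * n) 1).map
          (fun i => max (PySem.Int.floordiv i n) (PySem.Int.mod i n) + 1) =
        (PySem.List.pyRange a b 1).flatMap
          (fun i => (PySem.List.pyRange 0 n 1).map (fun j => if j ≤ i then i + 1 else j + 1)) := by
  intro k
  induction k with
  | zero =>
    intro a b hk
    have hba : b ≤ a := by omega
    rw [PySem.List.pyRange_one_eq_nil hba,
        PySem.List.pyRange_one_eq_nil (by nlinarith : b * n ≤ a * n)]
    simp
  | succ k ih =>
    intro a b hk
    have hab : a < b := by omega
    have h1 : a * n ≤ (a + 1) * n := by nlinarith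
    have h2 : (a + 1) * n ≤ b * n := by nlinarith
    rw [PySem.List.pyRange_one_append (a * n) ((a + 1) * n) (b * n) h1 h2, List.map_append,
        PySem.List.pyRange_one_cons hab, List.flatMap_cons]
    congr 1
    · have h3 : a * n + n = (a + 1) * n := by ring
      rw [← h3]
      simpa using pv_row n a 0 n hn le_rfl le_rfl
    · exact ih (a + 1) b (by omega)

lemma pv_main (n left right : Int) (hn : 0 < n) : solution n left right = solution_alt n left right := by
  unfold solution solution_alt
  set lq := PySem.Int.floordiv left n with hlqd
  set lr := PySem.Int.mod left n with hlrd
  set rq := PySem.Int.floordiv right n with hrqd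
  set rr := PySem.Int.mod right n with hrrd
  have hL : lq * n + lr = left := PySem.Int.floordiv_mul_add_mod left n
  have hR : rq * n + rr = right := PySem.Int.floordiv_mul_add_mod right n
  have hl0 : 0 ≤ lr := PySem.Int.mod_nonneg left hn
  have hln : lr < n := PySem.Int.mod_lt left hn
  have hr0 : 0 ≤ rr := PySem.Int.mod_nonneg right hn
  have hrn : rr < n := PySem.Int.mod_lt right hn
  simp only [beq_iff_eq]
  by_cases hq : lq = rq
  · rw [if_pos hq, if_pos hq]
    rw [← hL, ← hR, ← hq]
    have e1 : lq * n + rr + 1 = lq * n + (rr + 1) := by ring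
    rw [e1, pv_row n lq lr (rr + 1) hn hl0 (by omega)]
  · rw [if_neg hq, if_neg hq, PySem.List.foldl_append_eq_flatMap]
    rw [← pv_blocks n hn (rq - (lq + 1)).toNat (lq + 1) rq rfl]
    congr 1
    · congr 1
      rw [← hL]
      have e1 : (lq + 1) * n = lq * n + n := by ring
      rw [e1, pv_row n lq lr n hn hl0 le_rfl]
    · have e1 : rq * n = rq * n + 0 := by ring
      have e2 : right + 1 = rq * n + (rr + 1) := by omega
      rw [e1, e2, pv_row n rq 0 (rr + 1) hn le_rfl (by omega)]

-- ===== VERDICT (by name: the statement is the Claim_ definition above) =====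
theorem solution_spec : Claim_equal_solution := by
  intro n left right _ hpre
  have hn : 0 < n := by unfold Pre_solution at hpre; omega
  show solution n left right = solution_alt n left right
  exact pv_main n left right hn
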